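-- pv_equiv track=rewrite | github.com/artneutro/2026-leetcode-daily | 20260408-xor-after-range-multiplication-queries-i.py | xorAfterQueries
-- ===== SOURCE A (Python) =====
-- from typing import List
--
-- def xorAfterQueries(nums: List[int], queries: List[List[int]]) -> int:
--     index_q = 0
--     while index_q < len(queries) :
--         index_i = queries[index_q][0]
--         while index_i <= queries[index_q][1] :
--             nums[index_i] = (nums[index_i]*queries[index_q][3])%(10**9+7)
--             index_i += queries[index_q][2]
--         index_q += 1
--     solution = 0
--     for item in nums :
--         solution ^= item
--     return solution
-- ===== SOURCE B (Python) =====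
-- def xorAfterQueries(nums, queries):
--     MOD = 10**9 + 7
--     solution = 0
--     for i, v in enumerate(nums):
--         for q in queries:
--             if q[0] <= i <= q[1] and (i - q[0]) % q[2] == 0:
--                 v = v * q[3] % MOD
--         solution ^= v
--     return solution
-- ===== Notes on version B (the rewrite author's own statement) =====
-- stated objective: alternative
-- what changed: B interchanges the loops: instead of A's in-place index-stepping update pass per query followed by an XOR pass, B makes one pass over the array positions and, per position, folds all queries with a divisibility test (q[0] <= i <= q[1] and (i-q[0]) % q[2] == 0), XOR-ing as it goes and never mutating nums.
-- outside the precondition, e.g. on xorAfterQueries([1, 2, 3], [[-2, -1, 1, 5]]): A returns 4, B returns 0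
import Mathlib
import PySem

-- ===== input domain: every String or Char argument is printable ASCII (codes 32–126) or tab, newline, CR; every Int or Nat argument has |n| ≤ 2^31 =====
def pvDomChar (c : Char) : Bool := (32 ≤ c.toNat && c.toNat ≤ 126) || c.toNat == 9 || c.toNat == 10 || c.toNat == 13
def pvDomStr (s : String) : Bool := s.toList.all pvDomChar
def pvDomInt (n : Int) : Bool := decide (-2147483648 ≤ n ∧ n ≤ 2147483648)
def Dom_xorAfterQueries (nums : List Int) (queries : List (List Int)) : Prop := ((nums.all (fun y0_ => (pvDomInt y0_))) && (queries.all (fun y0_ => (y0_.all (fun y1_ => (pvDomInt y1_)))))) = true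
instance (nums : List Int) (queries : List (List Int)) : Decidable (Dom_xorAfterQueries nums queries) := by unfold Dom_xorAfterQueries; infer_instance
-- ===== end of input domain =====

-- B interchanges A's loops (per-position fold over queries with a divisibility test,
-- instead of per-query index-stepping updates); equivalence is about the RETURN value only:
-- A mutates nums in place, B does not.


-- ===== PORT A =====
-- q[j] with default 0: exact under Pre_ (every query has length ≥ 4, j nonnegative)
def pvQ (q : List Int) (j : Int) : Int := PySem.List.pyGetD q j 0

-- the inner 'while index_i <= q[1]' loop; fuel (r - i + 1).toNat bounds the number of
-- iterations (step ≥ 1 under Pre_, and the loop is skipped when it is 0)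
def pvInnerA (q : List Int) (ns : List Int) (i : Int) : Nat → List Int
  | 0 => ns
  | f + 1 =>
    if i ≤ pvQ q 1 then
      pvInnerA q
        (PySem.List.pySetD ns i (PySem.Int.mod (PySem.List.pyGetD ns i 0 * pvQ q 3) 1000000007))
        (i + pvQ q 2) f
    else ns

def xorAfterQueries (nums : List Int) (queries : List (List Int)) : Int :=
  (queries.foldl (fun ns q => pvInnerA q ns (pvQ q 0) ((pvQ q 1 - pvQ q 0 + 1).toNat)) nums).foldl
    (fun s x => PySem.Int.bxor s x) 0

-- ===== PORT B =====
-- one query applied to position i holding value v; the % by q[2] is only reached under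
-- Pre_ (Python's short-circuit 'and' protects it there too)
def pvApplyB (i : Int) (v : Int) (q : List Int) : Int :=
  if (pvQ q 0 ≤ i ∧ i ≤ pvQ q 1) ∧ PySem.Int.mod (i - pvQ q 0) (pvQ q 2) = 0 then
    PySem.Int.mod (v * pvQ q 3) 1000000007
  else v

def xorAfterQueries_alt (nums : List Int) (queries : List (List Int)) : Int :=
  (PySem.List.enumerate nums).foldl
    (fun sol p => PySem.Int.bxor sol (queries.foldl (pvApplyB p.1) p.2)) 0

-- ===== PRECONDITION & SPEC =====
-- Pre_ excludes exactly: a query row shorter than 2 (A raises IndexError), a row shorter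
-- than 4 whose range is non-empty (q[0] ≤ q[1]: A raises IndexError), and a query with
-- q[0] ≤ q[1] whose start is negative, whose step is ≤ 0, or whose last visited index
-- q[0] + ((q[1]-q[0])//q[2])*q[2] is out of range — there A raises IndexError or diverges,
-- except for negative in-range starts, where A's value comes from Python's negative-index
-- wraparound: an out-of-the-problem-domain corner no one would specify (cite in claim.json).
def Pre_xorAfterQueries (nums : List Int) (queries : List (List Int)) : Prop :=
  ∀ q ∈ queries, 2 ≤ q.length ∧
    (PySem.List.pyGetD q 0 0 ≤ PySem.List.pyGetD q 1 0 →
      4 ≤ q.length ∧ 0 ≤ PySem.List.pyGetD q 0 0 ∧ 1 ≤ PySem.List.pyGetD q 2 0 ∧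
        PySem.List.pyGetD q 0 0 +
          PySem.Int.floordiv (PySem.List.pyGetD q 1 0 - PySem.List.pyGetD q 0 0)
            (PySem.List.pyGetD q 2 0) * PySem.List.pyGetD q 2 0 < (nums.length : Int))
instance (nums : List Int) (queries : List (List Int)) : Decidable (Pre_xorAfterQueries nums queries) := by
  unfold Pre_xorAfterQueries; infer_instance

def pvWitness_xorAfterQueries : List Int × List (List Int) := ([1, 2, 3], [[0, 2, 1, 2]])

def Spec_xorAfterQueries (nums : List Int) (queries : List (List Int)) (out : Int) : Prop := out = xorAfterQueries_alt nums queries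
instance (nums : List Int) (queries : List (List Int)) (out : Int) : Decidable (Spec_xorAfterQueries nums queries out) := by unfold Spec_xorAfterQueries; infer_instance

-- ===== CLAIM (what is proved, stated in full; the proofs are below) =====
def Claim_equal_xorAfterQueries : Prop := ∀ (nums : List Int) (queries : List (List Int)), Dom_xorAfterQueries nums queries → Pre_xorAfterQueries nums queries → Spec_xorAfterQueries nums queries (xorAfterQueries nums queries)

-- ===== LEMMAS AND PROOFS =====

theorem pv_inner_eq (q : List Int) (hst : 1 ≤ pvQ q 2) :
    ∀ (f : Nat) (i : Int) (ns : List Int), 0 ≤ i → (pvQ q 1 - i + 1).toNat ≤ f →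
      pvInnerA q ns i f =
        (PySem.List.enumerate ns).map
          (fun p => if i ≤ p.1 ∧ p.1 ≤ pvQ q 1 ∧ PySem.Int.mod (p.1 - i) (pvQ q 2) = 0 then
              PySem.Int.mod (p.2 * pvQ q 3) 1000000007 else p.2) := by
  intro f
  induction f with
  | zero =>
    intro i ns _ hf
    have hri : pvQ q 1 < i := by omega
    have hcond : ∀ p : Int × Int,
        (if i ≤ p.1 ∧ p.1 ≤ pvQ q 1 ∧ PySem.Int.mod (p.1 - i) (pvQ q 2) = 0 then
          PySem.Int.mod (p.2 * pvQ q 3) 1000000007 else p.2) = p.2 := by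
      intro p; rw [if_neg]; rintro ⟨h1, h2, -⟩; omega
    simp only [pvInnerA, hcond]
    rw [PySem.List.map_snd_enumerate]
  | succ f ih =>
    intro i ns h0 hf
    by_cases hi : i ≤ pvQ q 1
    · rw [pvInnerA, if_pos hi,
        ih (i + pvQ q 2) _ (by omega) (by omega),
        PySem.List.pySetD_of_nonneg ns _ h0]
      apply List.ext_getElem
      · simp
      · intro k hk1 hk2
        simp only [List.getElem_map, PySem.List.getElem_enumerate, List.getElem_set,
          List.length_map, PySem.List.length_enumerate, List.length_set] at hk1 hk2 ⊢
        have hklen : k < ns.length := by simpa using hk2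
        by_cases hk : (k : Int) = i
        · have hkt : i.toNat = k := by omega
          have hmodz : PySem.Int.mod ((0 : Int) + k - i) (pvQ q 2) = 0 := by
            rw [show (0 : Int) + k - i = 0 by omega]
            simp [PySem.Int.mod]
          rw [if_pos hkt,
            if_neg (show ¬(i + pvQ q 2 ≤ (0:Int) + (k:Int) ∧ (0:Int) + (k:Int) ≤ pvQ q 1 ∧
              PySem.Int.mod ((0:Int) + (k:Int) - (i + pvQ q 2)) (pvQ q 2) = 0) from
              fun h' => absurd h'.1 (by omega)),
            if_pos ⟨show i ≤ (0:Int)+(k:Int) by omega, show (0:Int)+(k:Int) ≤ pvQ q 1 by omega, hmodz⟩,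
            PySem.List.pyGetD_eq_getElem ns 0 h0 (by omega)]
          subst hkt
          rfl
        · have hkt : ¬ i.toNat = k := by omega
          rw [if_neg hkt]
          have hmodeq : PySem.Int.mod ((0:Int) + k - (i + pvQ q 2)) (pvQ q 2) =
              PySem.Int.mod ((0:Int) + k - i) (pvQ q 2) := by
            rw [PySem.Int.mod_eq_emod_of_pos (show (0:Int) < pvQ q 2 by omega),
              PySem.Int.mod_eq_emod_of_pos (show (0:Int) < pvQ q 2 by omega),
              show (0:Int) + k - (i + pvQ q 2) = (0 + k - i) - pvQ q 2 by ring,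
              Int.sub_emod_right]
          rw [hmodeq]
          by_cases hc : i ≤ (0:Int) + k ∧ (0:Int) + k ≤ pvQ q 1 ∧
              PySem.Int.mod ((0:Int) + k - i) (pvQ q 2) = 0
          · obtain ⟨hc1, hc2, hc3⟩ := hc
            have hdvd : pvQ q 2 ∣ ((0:Int) + k - i) :=
              (PySem.Int.mod_eq_zero_iff_dvd _ _).mp hc3
            obtain ⟨c, hc'⟩ := hdvd
            have hpos : 0 < (0:Int) + (k:Int) - i := by omega
            have hcpos : 1 ≤ c := by nlinarith [hst, hpos, hc']
            have hstep : i + pvQ q 2 ≤ (0:Int) + k := by nlinarith [hst, hcpos, hc']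
            rw [if_pos ⟨hstep, hc2, hc3⟩, if_pos ⟨hc1, hc2, hc3⟩]
          · rw [if_neg (fun h' => hc ⟨by omega, h'.2.1, h'.2.2⟩), if_neg hc]
    · rw [pvInnerA, if_neg hi]
      have hcond : ∀ p : Int × Int,
          (if i ≤ p.1 ∧ p.1 ≤ pvQ q 1 ∧ PySem.Int.mod (p.1 - i) (pvQ q 2) = 0 then
            PySem.Int.mod (p.2 * pvQ q 3) 1000000007 else p.2) = p.2 := by
        intro p; rw [if_neg]; rintro ⟨h1, h2, -⟩; omega
      simp only [hcond]
      rw [PySem.List.map_snd_enumerate]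

theorem pv_stepA_eq (q : List Int) (h : pvQ q 0 ≤ pvQ q 1 → 0 ≤ pvQ q 0 ∧ 1 ≤ pvQ q 2)
    (ns : List Int) :
    pvInnerA q ns (pvQ q 0) ((pvQ q 1 - pvQ q 0 + 1).toNat) =
      (PySem.List.enumerate ns).map (fun p => pvApplyB p.1 p.2 q) := by
  by_cases hlr : pvQ q 0 ≤ pvQ q 1
  · obtain ⟨h0, hst⟩ := h hlr
    rw [pv_inner_eq q hst _ _ ns h0 le_rfl]
    apply List.map_congr_left
    intro p _
    simp [pvApplyB, and_assoc]
  · rw [show (pvQ q 1 - pvQ q 0 + 1).toNat = 0 by omega]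
    have hcond : ∀ p : Int × Int, pvApplyB p.1 p.2 q = p.2 := by
      intro p; unfold pvApplyB; rw [if_neg]; rintro ⟨⟨h1, h2⟩, -⟩; omega
    simp [pvInnerA, hcond, PySem.List.map_snd_enumerate]

theorem pv_enum_map_enum (F : Int → Int → Int) :
    ∀ (ns : List Int) (s : Int),
      PySem.List.enumerate ((PySem.List.enumerate ns s).map (fun p => F p.1 p.2)) s =
        (PySem.List.enumerate ns s).map (fun p => (p.1, F p.1 p.2)) := by
  intro ns
  induction ns with
  | nil => intro s; simp [PySem.List.enumerate_nil]
  | cons x xs ih => intro s; simp [PySem.List.enumerate_cons, ih]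

theorem pv_fold_eq :
    ∀ (qs : List (List Int)) (ns : List Int),
      (∀ q ∈ qs, pvQ q 0 ≤ pvQ q 1 → 0 ≤ pvQ q 0 ∧ 1 ≤ pvQ q 2) →
      qs.foldl (fun ns q => pvInnerA q ns (pvQ q 0) ((pvQ q 1 - pvQ q 0 + 1).toNat)) ns =
        (PySem.List.enumerate ns).map (fun p => qs.foldl (pvApplyB p.1) p.2) := by
  intro qs
  induction qs with
  | nil => intro ns _; simp [PySem.List.map_snd_enumerate]
  | cons q qs ih =>
    intro ns hpre
    rw [List.foldl_cons, ih _ (fun q' hq' => hpre q' (List.mem_cons_of_mem q hq')),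
      pv_stepA_eq q (hpre q List.mem_cons_self) ns, pv_enum_map_enum (fun a b => pvApplyB a b q) ns 0, List.map_map]
    simp [Function.comp]

-- ===== VERDICT (by name: the statement is the Claim_ definition above) =====
theorem xorAfterQueries_spec : Claim_equal_xorAfterQueries := by
  intro nums queries _ hpre
  show xorAfterQueries nums queries = xorAfterQueries_alt nums queries
  unfold xorAfterQueries xorAfterQueries_alt
  rw [pv_fold_eq queries nums
    (fun q hq hle => ⟨((hpre q hq).2 hle).2.1, ((hpre q hq).2 hle).2.2.1⟩),
    List.foldl_map]
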